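-- pv_equiv track=rewrite | github.com/bjuice1/it-diligence-agent | services/cost_engine/exports.py | _categorize_assumption
-- ===== SOURCE A (Python) =====
-- def _categorize_assumption(assumption: str) -> str:
--     """Categorize an assumption string."""
--     lower = assumption.lower()
--
--     if any(x in lower for x in ['user', 'count', 'headcount']):
--         return 'scale'
--     if any(x in lower for x in ['license', 'pricing', 'cost']):
--         return 'pricing'
--     if any(x in lower for x in ['cloud', 'azure', 'aws', 'deployment']):
--         return 'infrastructure'
--     if any(x in lower for x in ['sap', 'oracle', 'erp', 'netsuite']):
--         return 'applications'
--     if any(x in lower for x in ['complexity', 'standard', 'typical']):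
--         return 'complexity'
--     if any(x in lower for x in ['migration', 'duration', 'month', 'week']):
--         return 'timeline'
--
--     return 'general'
-- ===== SOURCE B (Python) =====
-- # Naive multi-pattern text scan: walk the lowered string once and, at each
-- # position, record the smallest-priority keyword that starts there; the final
-- # category is the one of the minimal matched keyword index.
-- KEYWORDS = [
--     ('user', 'scale'), ('count', 'scale'), ('headcount', 'scale'),
--     ('license', 'pricing'), ('pricing', 'pricing'), ('cost', 'pricing'),
--     ('cloud', 'infrastructure'), ('azure', 'infrastructure'),
--     ('aws', 'infrastructure'), ('deployment', 'infrastructure'),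
--     ('sap', 'applications'), ('oracle', 'applications'),
--     ('erp', 'applications'), ('netsuite', 'applications'),
--     ('complexity', 'complexity'), ('standard', 'complexity'),
--     ('typical', 'complexity'),
--     ('migration', 'timeline'), ('duration', 'timeline'),
--     ('month', 'timeline'), ('week', 'timeline'),
-- ]
--
--
-- def _categorize_assumption(assumption: str) -> str:
--     """Categorize an assumption string."""
--     lower = assumption.lower()
--     best = len(KEYWORDS)
--     for i in range(len(lower)):
--         for j in range(len(KEYWORDS)):
--             if lower.startswith(KEYWORDS[j][0], i):
--                 best = min(best, j)
--     return KEYWORDS[best][1] if best < len(KEYWORDS) else 'general'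
-- ===== Notes on version B (the rewrite author's own statement) =====
-- stated objective: alternative
-- what changed: Instead of six per-rule any(substring in lower) checks with early return, B walks the lowered string once and at each position tests which entries of one flat (keyword, category) priority table start there, folding a minimal matched keyword index; the category at that minimal index (or 'general') is returned. Same O(n*k) asymptotics; it trades CPython's C-level substring search for an explicit positional scan, so it is slower by a constant factor in Python.
import Mathlib
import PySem

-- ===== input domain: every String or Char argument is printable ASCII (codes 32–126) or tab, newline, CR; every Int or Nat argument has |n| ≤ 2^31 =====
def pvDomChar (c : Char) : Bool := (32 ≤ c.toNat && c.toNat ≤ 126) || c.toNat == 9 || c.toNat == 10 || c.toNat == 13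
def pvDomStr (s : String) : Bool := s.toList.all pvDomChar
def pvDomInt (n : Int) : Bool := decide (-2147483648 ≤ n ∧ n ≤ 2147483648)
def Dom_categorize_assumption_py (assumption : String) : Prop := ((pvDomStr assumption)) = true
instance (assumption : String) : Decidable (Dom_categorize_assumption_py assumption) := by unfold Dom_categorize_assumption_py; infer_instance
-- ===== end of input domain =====

-- B replaces A's six per-rule substring checks by a single positional scan of the lowered string that records the minimal-priority keyword starting at each position (alternative algorithm, same asymptotic cost; slower constants in CPython).


-- ===== PORT A =====
def categorize_assumption_py (assumption : String) : String :=
  let lower := PySem.Str.lower assumption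
  if ["user", "count", "headcount"].any (fun x => PySem.Str.isIn x lower) then "scale"
  else if ["license", "pricing", "cost"].any (fun x => PySem.Str.isIn x lower) then "pricing"
  else if ["cloud", "azure", "aws", "deployment"].any (fun x => PySem.Str.isIn x lower) then "infrastructure"
  else if ["sap", "oracle", "erp", "netsuite"].any (fun x => PySem.Str.isIn x lower) then "applications"
  else if ["complexity", "standard", "typical"].any (fun x => PySem.Str.isIn x lower) then "complexity"
  else if ["migration", "duration", "month", "week"].any (fun x => PySem.Str.isIn x lower) then "timeline"
  else "general"

-- ===== PORT B =====
-- Source B's flat (keyword, category) priority table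
def pvKeywords : List (String × String) :=
  [("user", "scale"), ("count", "scale"), ("headcount", "scale"),
   ("license", "pricing"), ("pricing", "pricing"), ("cost", "pricing"),
   ("cloud", "infrastructure"), ("azure", "infrastructure"),
   ("aws", "infrastructure"), ("deployment", "infrastructure"),
   ("sap", "applications"), ("oracle", "applications"),
   ("erp", "applications"), ("netsuite", "applications"),
   ("complexity", "complexity"), ("standard", "complexity"),
   ("typical", "complexity"),
   ("migration", "timeline"), ("duration", "timeline"),
   ("month", "timeline"), ("week", "timeline")]

def categorize_assumption_py_alt (assumption : String) : String :=
  let lower := PySem.Str.lower assumption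
  let best : Int :=
    (PySem.List.pyRange 0 (PySem.Str.len lower) 1).foldl (fun best i =>
      (PySem.List.pyRange 0 (pvKeywords.length : Int) 1).foldl (fun b j =>
        -- lower.startswith(KEYWORDS[j][0], i): exact since 0 ≤ i (a prefix of lower[i:])
        if PySem.Chars.startswith (lower.toList.drop i.toNat)
            ((PySem.List.pyGetD pvKeywords j ("", "")).1).toList
        then min b j else b) best) (pvKeywords.length : Int)
  if best < (pvKeywords.length : Int)
  then (PySem.List.pyGetD pvKeywords best ("", "")).2 else "general"

-- ===== PRECONDITION & SPEC =====
def Spec_categorize_assumption_py (assumption : String) (out : String) : Prop := out = categorize_assumption_py_alt assumption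
instance (assumption : String) (out : String) : Decidable (Spec_categorize_assumption_py assumption out) := by unfold Spec_categorize_assumption_py; infer_instance

-- ===== CLAIM (what is proved, stated in full; the proofs are below) =====
def Claim_equal_categorize_assumption_py : Prop := ∀ (assumption : String), Dom_categorize_assumption_py assumption → Spec_categorize_assumption_py assumption (categorize_assumption_py assumption)

-- ===== LEMMAS AND PROOFS =====

-- B's loop state, abstracted over the lowered character list
def pvBest (cs : List Char) : Int :=
  (PySem.List.pyRange 0 (cs.length : Int) 1).foldl (fun best i =>
    (PySem.List.pyRange 0 (pvKeywords.length : Int) 1).foldl (fun b j =>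
      if PySem.Chars.startswith (cs.drop i.toNat)
          ((PySem.List.pyGetD pvKeywords j ("", "")).1).toList
      then min b j else b) best) (pvKeywords.length : Int)

def pvKw (j : Int) : List Char := ((PySem.List.pyGetD pvKeywords j ("", "")).1).toList

lemma pv_alt_eq (a : String) :
    categorize_assumption_py_alt a =
      (if pvBest ((PySem.Str.lower a).toList) < (pvKeywords.length : Int)
       then (PySem.List.pyGetD pvKeywords (pvBest ((PySem.Str.lower a).toList)) ("", "")).2
       else "general") := by
  simp [categorize_assumption_py_alt, pvBest, PySem.Str.len_eq]

-- flatten B's nested loop into one min-fold over the matched keyword indices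
lemma pv_nested_fold_eq (R K : List Int) (SW : Int → Int → Bool) (b0 : Int) :
    R.foldl (fun b i => K.foldl (fun b j => if SW i j then min b j else b) b) b0
      = ((((R.flatMap (fun i => K.map (Prod.mk i))).filter
            (fun p => SW p.1 p.2)).map Prod.snd)).foldl min b0 := by
  rw [List.foldl_map,
      ← PySem.List.foldl_if_eq_foldl_filter (fun p : Int × Int => SW p.1 p.2)
          (fun b p => min b p.2),
      List.foldl_flatMap]
  simp [List.foldl_map]

lemma pv_hit_iff (cs : List Char) (j : Int) (h0 : 0 ≤ j) (h21 : j < 21) :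
    (∃ i ∈ PySem.List.pyRange 0 (cs.length : Int) 1,
        PySem.Chars.startswith (cs.drop i.toNat) (pvKw j) = true)
      ↔ PySem.Chars.isIn (pvKw j) cs = true := by
  constructor
  · rintro ⟨i, _, hsw⟩
    rw [← PySem.Chars.exists_prefix_drop_iff_isIn]
    exact ⟨i.toNat, (PySem.Chars.startswith_iff _ _).1 hsw⟩
  · intro hin
    obtain ⟨k, hk⟩ := (PySem.Chars.exists_prefix_drop_iff_isIn (pvKw j) cs).2 hin
    have hkw : pvKw j ≠ [] := by interval_cases j <;> decide
    have hne : cs.drop k ≠ [] := by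
      intro h; rw [h] at hk; exact hkw (List.prefix_nil.mp hk)
    have hklt : k < cs.length := by
      by_contra h
      exact hne (List.drop_eq_nil_of_le (by omega))
    refine ⟨(k : Int), PySem.List.mem_pyRange_one.2 ⟨by omega, by exact_mod_cast hklt⟩, ?_⟩
    rw [PySem.Chars.startswith_iff]
    simpa using hk

lemma pv_best_spec (cs : List Char) :
    (0 ≤ pvBest cs ∧ pvBest cs ≤ 21) ∧
    (pvBest cs = 21 ∨ PySem.Chars.isIn (pvKw (pvBest cs)) cs = true) ∧
    (∀ j : Int, 0 ≤ j → j < pvBest cs → PySem.Chars.isIn (pvKw j) cs = false) := by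
  have hlen : (pvKeywords.length : Int) = 21 := by decide
  have hb : pvBest cs =
      ((((PySem.List.pyRange 0 (cs.length : Int) 1).flatMap
            (fun i => (PySem.List.pyRange 0 (pvKeywords.length : Int) 1).map (Prod.mk i))).filter
          (fun p => PySem.Chars.startswith (cs.drop p.1.toNat) (pvKw p.2))).map Prod.snd).foldl
        min (pvKeywords.length : Int) := by
    unfold pvBest
    exact pv_nested_fold_eq _ _ (fun i j => PySem.Chars.startswith (cs.drop i.toNat) (pvKw j)) _
  set M := ((((PySem.List.pyRange 0 (cs.length : Int) 1).flatMap
        (fun i => (PySem.List.pyRange 0 (pvKeywords.length : Int) 1).map (Prod.mk i))).filter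
      (fun p => PySem.Chars.startswith (cs.drop p.1.toNat) (pvKw p.2))).map Prod.snd) with hM
  have hmem : ∀ x : Int, x ∈ M ↔
      (0 ≤ x ∧ x < 21) ∧ ∃ i ∈ PySem.List.pyRange 0 (cs.length : Int) 1,
        PySem.Chars.startswith (cs.drop i.toNat) (pvKw x) = true := by
    intro x
    simp only [hM, List.mem_map, List.mem_filter, List.mem_flatMap, hlen]
    constructor
    · rintro ⟨p, ⟨⟨i', hi', j', hj', rfl⟩, hsw⟩, rfl⟩
      have := PySem.List.mem_pyRange_one.1 hj'
      exact ⟨⟨this.1, by omega⟩, i', hi', hsw⟩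
    · rintro ⟨⟨hx0, hx21⟩, i, hi, hsw⟩
      exact ⟨(i, x), ⟨⟨i, hi, x, PySem.List.mem_pyRange_one.2 ⟨hx0, by omega⟩, rfl⟩, hsw⟩, rfl⟩
  rw [hb, hlen]
  have hle := PySem.List.foldl_min_le M (21 : Int)
  have hmm := PySem.List.foldl_min_mem M (21 : Int)
  refine ⟨⟨?_, hle.1⟩, ?_, ?_⟩
  · rcases hmm with h | h
    · omega
    · have := ((hmem _).1 h).1.1
      omega
  · rcases hmm with h | h
    · exact Or.inl h
    · obtain ⟨⟨h0, h21⟩, hex⟩ := (hmem _).1 h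
      exact Or.inr ((pv_hit_iff cs _ h0 h21).1 hex)
  · intro j hj0 hjlt
    by_contra hcon
    have htrue : PySem.Chars.isIn (pvKw j) cs = true := by
      cases h : PySem.Chars.isIn (pvKw j) cs
      · exact absurd h hcon
      · rfl
    have hj21 : j < 21 := by have := hle.1; omega
    have hjM : j ∈ M := (hmem j).2 ⟨⟨hj0, hj21⟩, (pv_hit_iff cs j hj0 hj21).2 htrue⟩
    have := hle.2 j hjM
    omega

lemma pvKw_eq_getElem (j : Int) (h0 : 0 ≤ j) (h21 : j.toNat < pvKeywords.length) :
    pvKw j = (pvKeywords[j.toNat]).1.toList := by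
  unfold pvKw
  rw [PySem.List.pyGetD_of_nonneg _ _ h0, List.getD_eq_getElem _ _ h21]

-- B's best index is the index of the first matching keyword (findIdx? view)
lemma pv_best_eq_first (cs : List Char) :
    pvBest cs =
      (match List.findIdx? (fun kc => PySem.Chars.isIn kc.1.toList cs) pvKeywords with
       | some j => (j : Int)
       | none => 21) := by
  obtain ⟨⟨hb0, hb21⟩, hhit, hmin⟩ := pv_best_spec cs
  have hlen : pvKeywords.length = 21 := by decide
  cases h : List.findIdx? (fun kc => PySem.Chars.isIn kc.1.toList cs) pvKeywords with
  | none =>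
    show pvBest cs = 21
    rw [List.findIdx?_eq_none_iff] at h
    by_cases hq : pvBest cs = 21
    · exact hq
    · exfalso
      have hblt : pvBest cs < 21 := by omega
      rcases hhit with h21 | htrue
      · exact hq h21
      · have hidx : (pvBest cs).toNat < pvKeywords.length := by omega
        have hf := h pvKeywords[(pvBest cs).toNat] (List.getElem_mem hidx)
        rw [pvKw_eq_getElem _ hb0 hidx] at htrue
        rw [hf] at htrue
        exact Bool.false_ne_true htrue
  | some j =>
    show pvBest cs = (j : Int)
    obtain ⟨hjlen, hpj, hprev⟩ := List.findIdx?_eq_some_iff_getElem.1 h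
    have h1 : pvBest cs ≤ (j : Int) := by
      by_contra hcon
      have hj0 : (0:Int) ≤ (j:Int) := by omega
      have hf := hmin (j : Int) hj0 (by omega)
      rw [pvKw_eq_getElem _ hj0 (by simpa using hjlen)] at hf
      simp only [Int.toNat_natCast] at hf
      rw [hf] at hpj
      exact Bool.false_ne_true hpj
    have h2 : (j : Int) ≤ pvBest cs := by
      by_contra hcon
      have hblt : (pvBest cs).toNat < j := by omega
      rcases hhit with h21 | htrue
      · omega
      · have hidx : (pvBest cs).toNat < pvKeywords.length := by omega
        rw [pvKw_eq_getElem _ hb0 hidx] at htrue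
        exact hprev (pvBest cs).toNat hblt htrue
    omega

-- ===== VERDICT (by name: the statement is the Claim_ definition above) =====
theorem categorize_assumption_py_spec : Claim_equal_categorize_assumption_py := by
  intro a _
  unfold Spec_categorize_assumption_py
  rw [pv_alt_eq, pv_best_eq_first]
  cases h : List.findIdx? (fun kc => PySem.Chars.isIn kc.1.toList (PySem.Str.lower a).toList) pvKeywords with
  | none =>
    rw [List.findIdx?_eq_none_iff] at h
    have h0 := h ("user", "scale") (by decide)
    have h1 := h ("count", "scale") (by decide)
    have h2 := h ("headcount", "scale") (by decide)
    have h3 := h ("license", "pricing") (by decide)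
    have h4 := h ("pricing", "pricing") (by decide)
    have h5 := h ("cost", "pricing") (by decide)
    have h6 := h ("cloud", "infrastructure") (by decide)
    have h7 := h ("azure", "infrastructure") (by decide)
    have h8 := h ("aws", "infrastructure") (by decide)
    have h9 := h ("deployment", "infrastructure") (by decide)
    have h10 := h ("sap", "applications") (by decide)
    have h11 := h ("oracle", "applications") (by decide)
    have h12 := h ("erp", "applications") (by decide)
    have h13 := h ("netsuite", "applications") (by decide)
    have h14 := h ("complexity", "complexity") (by decide)
    have h15 := h ("standard", "complexity") (by decide)
    have h16 := h ("typical", "complexity") (by decide)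
    have h17 := h ("migration", "timeline") (by decide)
    have h18 := h ("duration", "timeline") (by decide)
    have h19 := h ("month", "timeline") (by decide)
    have h20 := h ("week", "timeline") (by decide)
    simp at h0 h1 h2 h3 h4 h5 h6 h7 h8 h9 h10 h11 h12 h13 h14 h15 h16 h17 h18 h19 h20
    simp [categorize_assumption_py, PySem.Str.isIn, pvKeywords, h0, h1, h2, h3, h4, h5, h6, h7, h8, h9, h10, h11, h12, h13, h14, h15, h16, h17, h18, h19, h20]
  | some j =>
    obtain ⟨hjlen, hpj, hprev⟩ := List.findIdx?_eq_some_iff_getElem.1 h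
    have hlen : pvKeywords.length = 21 := by decide
    rw [hlen] at hjlen
    interval_cases j
    · -- j = 0
      simp [pvKeywords] at hpj
      simp [categorize_assumption_py, PySem.Str.isIn, pvKeywords, PySem.List.pyGetD, hpj]
    · -- j = 1
      have e0 := hprev 0 (by omega)
      simp [pvKeywords] at hpj e0
      simp [categorize_assumption_py, PySem.Str.isIn, pvKeywords, PySem.List.pyGetD, hpj, e0]
    · -- j = 2
      have e0 := hprev 0 (by omega)
      have e1 := hprev 1 (by omega)
      simp [pvKeywords] at hpj e0 e1
      simp [categorize_assumption_py, PySem.Str.isIn, pvKeywords, PySem.List.pyGetD, hpj, e0, e1]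
    · -- j = 3
      have e0 := hprev 0 (by omega)
      have e1 := hprev 1 (by omega)
      have e2 := hprev 2 (by omega)
      simp [pvKeywords] at hpj e0 e1 e2
      simp [categorize_assumption_py, PySem.Str.isIn, pvKeywords, PySem.List.pyGetD, hpj, e0, e1, e2]
    · -- j = 4
      have e0 := hprev 0 (by omega)
      have e1 := hprev 1 (by omega)
      have e2 := hprev 2 (by omega)
      have e3 := hprev 3 (by omega)
      simp [pvKeywords] at hpj e0 e1 e2 e3
      simp [categorize_assumption_py, PySem.Str.isIn, pvKeywords, PySem.List.pyGetD, hpj, e0, e1, e2, e3]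
    · -- j = 5
      have e0 := hprev 0 (by omega)
      have e1 := hprev 1 (by omega)
      have e2 := hprev 2 (by omega)
      have e3 := hprev 3 (by omega)
      have e4 := hprev 4 (by omega)
      simp [pvKeywords] at hpj e0 e1 e2 e3 e4
      simp [categorize_assumption_py, PySem.Str.isIn, pvKeywords, PySem.List.pyGetD, hpj, e0, e1, e2, e3, e4]
    · -- j = 6
      have e0 := hprev 0 (by omega)
      have e1 := hprev 1 (by omega)
      have e2 := hprev 2 (by omega)
      have e3 := hprev 3 (by omega)
      have e4 := hprev 4 (by omega)
      have e5 := hprev 5 (by omega)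
      simp [pvKeywords] at hpj e0 e1 e2 e3 e4 e5
      simp [categorize_assumption_py, PySem.Str.isIn, pvKeywords, PySem.List.pyGetD, hpj, e0, e1, e2, e3, e4, e5]
    · -- j = 7
      have e0 := hprev 0 (by omega)
      have e1 := hprev 1 (by omega)
      have e2 := hprev 2 (by omega)
      have e3 := hprev 3 (by omega)
      have e4 := hprev 4 (by omega)
      have e5 := hprev 5 (by omega)
      have e6 := hprev 6 (by omega)
      simp [pvKeywords] at hpj e0 e1 e2 e3 e4 e5 e6
      simp [categorize_assumption_py, PySem.Str.isIn, pvKeywords, PySem.List.pyGetD, hpj, e0, e1, e2, e3, e4, e5, e6]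
    · -- j = 8
      have e0 := hprev 0 (by omega)
      have e1 := hprev 1 (by omega)
      have e2 := hprev 2 (by omega)
      have e3 := hprev 3 (by omega)
      have e4 := hprev 4 (by omega)
      have e5 := hprev 5 (by omega)
      have e6 := hprev 6 (by omega)
      have e7 := hprev 7 (by omega)
      simp [pvKeywords] at hpj e0 e1 e2 e3 e4 e5 e6 e7
      simp [categorize_assumption_py, PySem.Str.isIn, pvKeywords, PySem.List.pyGetD, hpj, e0, e1, e2, e3, e4, e5, e6, e7]
    · -- j = 9
      have e0 := hprev 0 (by omega)
      have e1 := hprev 1 (by omega)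
      have e2 := hprev 2 (by omega)
      have e3 := hprev 3 (by omega)
      have e4 := hprev 4 (by omega)
      have e5 := hprev 5 (by omega)
      have e6 := hprev 6 (by omega)
      have e7 := hprev 7 (by omega)
      have e8 := hprev 8 (by omega)
      simp [pvKeywords] at hpj e0 e1 e2 e3 e4 e5 e6 e7 e8
      simp [categorize_assumption_py, PySem.Str.isIn, pvKeywords, PySem.List.pyGetD, hpj, e0, e1, e2, e3, e4, e5, e6, e7, e8]
    · -- j = 10
      have e0 := hprev 0 (by omega)
      have e1 := hprev 1 (by omega)
      have e2 := hprev 2 (by omega)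
      have e3 := hprev 3 (by omega)
      have e4 := hprev 4 (by omega)
      have e5 := hprev 5 (by omega)
      have e6 := hprev 6 (by omega)
      have e7 := hprev 7 (by omega)
      have e8 := hprev 8 (by omega)
      have e9 := hprev 9 (by omega)
      simp [pvKeywords] at hpj e0 e1 e2 e3 e4 e5 e6 e7 e8 e9
      simp [categorize_assumption_py, PySem.Str.isIn, pvKeywords, PySem.List.pyGetD, hpj, e0, e1, e2, e3, e4, e5, e6, e7, e8, e9]
    · -- j = 11
      have e0 := hprev 0 (by omega)
      have e1 := hprev 1 (by omega)
      have e2 := hprev 2 (by omega)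
      have e3 := hprev 3 (by omega)
      have e4 := hprev 4 (by omega)
      have e5 := hprev 5 (by omega)
      have e6 := hprev 6 (by omega)
      have e7 := hprev 7 (by omega)
      have e8 := hprev 8 (by omega)
      have e9 := hprev 9 (by omega)
      have e10 := hprev 10 (by omega)
      simp [pvKeywords] at hpj e0 e1 e2 e3 e4 e5 e6 e7 e8 e9 e10
      simp [categorize_assumption_py, PySem.Str.isIn, pvKeywords, PySem.List.pyGetD, hpj, e0, e1, e2, e3, e4, e5, e6, e7, e8, e9, e10]
    · -- j = 12
      have e0 := hprev 0 (by omega)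
      have e1 := hprev 1 (by omega)
      have e2 := hprev 2 (by omega)
      have e3 := hprev 3 (by omega)
      have e4 := hprev 4 (by omega)
      have e5 := hprev 5 (by omega)
      have e6 := hprev 6 (by omega)
      have e7 := hprev 7 (by omega)
      have e8 := hprev 8 (by omega)
      have e9 := hprev 9 (by omega)
      have e10 := hprev 10 (by omega)
      have e11 := hprev 11 (by omega)
      simp [pvKeywords] at hpj e0 e1 e2 e3 e4 e5 e6 e7 e8 e9 e10 e11
      simp [categorize_assumption_py, PySem.Str.isIn, pvKeywords, PySem.List.pyGetD, hpj, e0, e1, e2, e3, e4, e5, e6, e7, e8, e9, e10, e11]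
    · -- j = 13
      have e0 := hprev 0 (by omega)
      have e1 := hprev 1 (by omega)
      have e2 := hprev 2 (by omega)
      have e3 := hprev 3 (by omega)
      have e4 := hprev 4 (by omega)
      have e5 := hprev 5 (by omega)
      have e6 := hprev 6 (by omega)
      have e7 := hprev 7 (by omega)
      have e8 := hprev 8 (by omega)
      have e9 := hprev 9 (by omega)
      have e10 := hprev 10 (by omega)
      have e11 := hprev 11 (by omega)
      have e12 := hprev 12 (by omega)
      simp [pvKeywords] at hpj e0 e1 e2 e3 e4 e5 e6 e7 e8 e9 e10 e11 e12
      simp [categorize_assumption_py, PySem.Str.isIn, pvKeywords, PySem.List.pyGetD, hpj, e0, e1, e2, e3, e4, e5, e6, e7, e8, e9, e10, e11, e12]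
    · -- j = 14
      have e0 := hprev 0 (by omega)
      have e1 := hprev 1 (by omega)
      have e2 := hprev 2 (by omega)
      have e3 := hprev 3 (by omega)
      have e4 := hprev 4 (by omega)
      have e5 := hprev 5 (by omega)
      have e6 := hprev 6 (by omega)
      have e7 := hprev 7 (by omega)
      have e8 := hprev 8 (by omega)
      have e9 := hprev 9 (by omega)
      have e10 := hprev 10 (by omega)
      have e11 := hprev 11 (by omega)
      have e12 := hprev 12 (by omega)
      have e13 := hprev 13 (by omega)
      simp [pvKeywords] at hpj e0 e1 e2 e3 e4 e5 e6 e7 e8 e9 e10 e11 e12 e13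
      simp [categorize_assumption_py, PySem.Str.isIn, pvKeywords, PySem.List.pyGetD, hpj, e0, e1, e2, e3, e4, e5, e6, e7, e8, e9, e10, e11, e12, e13]
    · -- j = 15
      have e0 := hprev 0 (by omega)
      have e1 := hprev 1 (by omega)
      have e2 := hprev 2 (by omega)
      have e3 := hprev 3 (by omega)
      have e4 := hprev 4 (by omega)
      have e5 := hprev 5 (by omega)
      have e6 := hprev 6 (by omega)
      have e7 := hprev 7 (by omega)
      have e8 := hprev 8 (by omega)
      have e9 := hprev 9 (by omega)
      have e10 := hprev 10 (by omega)
      have e11 := hprev 11 (by omega)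
      have e12 := hprev 12 (by omega)
      have e13 := hprev 13 (by omega)
      have e14 := hprev 14 (by omega)
      simp [pvKeywords] at hpj e0 e1 e2 e3 e4 e5 e6 e7 e8 e9 e10 e11 e12 e13 e14
      simp [categorize_assumption_py, PySem.Str.isIn, pvKeywords, PySem.List.pyGetD, hpj, e0, e1, e2, e3, e4, e5, e6, e7, e8, e9, e10, e11, e12, e13, e14]
    · -- j = 16
      have e0 := hprev 0 (by omega)
      have e1 := hprev 1 (by omega)
      have e2 := hprev 2 (by omega)
      have e3 := hprev 3 (by omega)
      have e4 := hprev 4 (by omega)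
      have e5 := hprev 5 (by omega)
      have e6 := hprev 6 (by omega)
      have e7 := hprev 7 (by omega)
      have e8 := hprev 8 (by omega)
      have e9 := hprev 9 (by omega)
      have e10 := hprev 10 (by omega)
      have e11 := hprev 11 (by omega)
      have e12 := hprev 12 (by omega)
      have e13 := hprev 13 (by omega)
      have e14 := hprev 14 (by omega)
      have e15 := hprev 15 (by omega)
      simp [pvKeywords] at hpj e0 e1 e2 e3 e4 e5 e6 e7 e8 e9 e10 e11 e12 e13 e14 e15
      simp [categorize_assumption_py, PySem.Str.isIn, pvKeywords, PySem.List.pyGetD, hpj, e0, e1, e2, e3, e4, e5, e6, e7, e8, e9, e10, e11, e12, e13, e14, e15]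
    · -- j = 17
      have e0 := hprev 0 (by omega)
      have e1 := hprev 1 (by omega)
      have e2 := hprev 2 (by omega)
      have e3 := hprev 3 (by omega)
      have e4 := hprev 4 (by omega)
      have e5 := hprev 5 (by omega)
      have e6 := hprev 6 (by omega)
      have e7 := hprev 7 (by omega)
      have e8 := hprev 8 (by omega)
      have e9 := hprev 9 (by omega)
      have e10 := hprev 10 (by omega)
      have e11 := hprev 11 (by omega)
      have e12 := hprev 12 (by omega)
      have e13 := hprev 13 (by omega)
      have e14 := hprev 14 (by omega)
      have e15 := hprev 15 (by omega)
      have e16 := hprev 16 (by omega)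
      simp [pvKeywords] at hpj e0 e1 e2 e3 e4 e5 e6 e7 e8 e9 e10 e11 e12 e13 e14 e15 e16
      simp [categorize_assumption_py, PySem.Str.isIn, pvKeywords, PySem.List.pyGetD, hpj, e0, e1, e2, e3, e4, e5, e6, e7, e8, e9, e10, e11, e12, e13, e14, e15, e16]
    · -- j = 18
      have e0 := hprev 0 (by omega)
      have e1 := hprev 1 (by omega)
      have e2 := hprev 2 (by omega)
      have e3 := hprev 3 (by omega)
      have e4 := hprev 4 (by omega)
      have e5 := hprev 5 (by omega)
      have e6 := hprev 6 (by omega)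
      have e7 := hprev 7 (by omega)
      have e8 := hprev 8 (by omega)
      have e9 := hprev 9 (by omega)
      have e10 := hprev 10 (by omega)
      have e11 := hprev 11 (by omega)
      have e12 := hprev 12 (by omega)
      have e13 := hprev 13 (by omega)
      have e14 := hprev 14 (by omega)
      have e15 := hprev 15 (by omega)
      have e16 := hprev 16 (by omega)
      have e17 := hprev 17 (by omega)
      simp [pvKeywords] at hpj e0 e1 e2 e3 e4 e5 e6 e7 e8 e9 e10 e11 e12 e13 e14 e15 e16 e17
      simp [categorize_assumption_py, PySem.Str.isIn, pvKeywords, PySem.List.pyGetD, hpj, e0, e1, e2, e3, e4, e5, e6, e7, e8, e9, e10, e11, e12, e13, e14, e15, e16, e17]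
    · -- j = 19
      have e0 := hprev 0 (by omega)
      have e1 := hprev 1 (by omega)
      have e2 := hprev 2 (by omega)
      have e3 := hprev 3 (by omega)
      have e4 := hprev 4 (by omega)
      have e5 := hprev 5 (by omega)
      have e6 := hprev 6 (by omega)
      have e7 := hprev 7 (by omega)
      have e8 := hprev 8 (by omega)
      have e9 := hprev 9 (by omega)
      have e10 := hprev 10 (by omega)
      have e11 := hprev 11 (by omega)
      have e12 := hprev 12 (by omega)
      have e13 := hprev 13 (by omega)
      have e14 := hprev 14 (by omega)
      have e15 := hprev 15 (by omega)
      have e16 := hprev 16 (by omega)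
      have e17 := hprev 17 (by omega)
      have e18 := hprev 18 (by omega)
      simp [pvKeywords] at hpj e0 e1 e2 e3 e4 e5 e6 e7 e8 e9 e10 e11 e12 e13 e14 e15 e16 e17 e18
      simp [categorize_assumption_py, PySem.Str.isIn, pvKeywords, PySem.List.pyGetD, hpj, e0, e1, e2, e3, e4, e5, e6, e7, e8, e9, e10, e11, e12, e13, e14, e15, e16, e17, e18]
    · -- j = 20
      have e0 := hprev 0 (by omega)
      have e1 := hprev 1 (by omega)
      have e2 := hprev 2 (by omega)
      have e3 := hprev 3 (by omega)
      have e4 := hprev 4 (by omega)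
      have e5 := hprev 5 (by omega)
      have e6 := hprev 6 (by omega)
      have e7 := hprev 7 (by omega)
      have e8 := hprev 8 (by omega)
      have e9 := hprev 9 (by omega)
      have e10 := hprev 10 (by omega)
      have e11 := hprev 11 (by omega)
      have e12 := hprev 12 (by omega)
      have e13 := hprev 13 (by omega)
      have e14 := hprev 14 (by omega)
      have e15 := hprev 15 (by omega)
      have e16 := hprev 16 (by omega)
      have e17 := hprev 17 (by omega)
      have e18 := hprev 18 (by omega)
      have e19 := hprev 19 (by omega)
      simp [pvKeywords] at hpj e0 e1 e2 e3 e4 e5 e6 e7 e8 e9 e10 e11 e12 e13 e14 e15 e16 e17 e18 e19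
      simp [categorize_assumption_py, PySem.Str.isIn, pvKeywords, PySem.List.pyGetD, hpj, e0, e1, e2, e3, e4, e5, e6, e7, e8, e9, e10, e11, e12, e13, e14, e15, e16, e17, e18, e19]
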